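-- pv_equiv track=rewrite | github.com/Orange-Cyberdefense/grepmarx | app/analysis/util.py | remove_ignored_files
-- ===== SOURCE A (Python) =====
-- def remove_ignored_files(files_paths, ignore):
--     result = []
--     if not ignore:
--         return files_paths
--     for path in files_paths:
--         should_include = True
--         for data in ignore:
--             if data in path:
--                 should_include = False
--                 break
--         if should_include:
--             result.append(path)
--     return result
-- ===== SOURCE B (Python) =====
-- def remove_ignored_files(files_paths, ignore):
--     remaining = files_paths
--     for data in ignore:
--         remaining = [path for path in remaining if data not in path]
--     return remaining
-- ===== Notes on version B (the rewrite author's own statement) =====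
-- stated objective: alternative
-- what changed: B swaps the loop nesting: instead of testing every ignore substring inside a per-path loop with a break, it iterates over the ignore list once, successively filtering the surviving paths with each substring (progressive sieve); equivalence needs a proof that the filters commute/compose.
import Mathlib
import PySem

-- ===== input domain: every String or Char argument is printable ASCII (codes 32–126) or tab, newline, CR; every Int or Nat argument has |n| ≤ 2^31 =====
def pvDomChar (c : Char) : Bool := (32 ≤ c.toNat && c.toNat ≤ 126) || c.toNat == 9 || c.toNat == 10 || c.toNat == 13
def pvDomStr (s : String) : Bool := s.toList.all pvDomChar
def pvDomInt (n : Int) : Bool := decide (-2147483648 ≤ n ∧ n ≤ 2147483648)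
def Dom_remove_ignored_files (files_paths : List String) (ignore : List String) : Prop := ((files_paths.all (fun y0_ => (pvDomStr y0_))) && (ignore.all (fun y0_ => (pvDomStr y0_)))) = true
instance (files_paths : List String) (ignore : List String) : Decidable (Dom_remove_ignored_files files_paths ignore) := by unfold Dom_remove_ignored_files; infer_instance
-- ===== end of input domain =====

-- ===== PORT A =====
-- Port of A: early return on empty ignore, then per-path loop appending paths whose
-- inner ignore-scan (first match breaks) finds no contained substring.
def remove_ignored_files (files_paths : List String) (ignore : List String) : List String :=
  if ignore = [] then files_paths
  else
    files_paths.foldl (fun result path =>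
      let should_include := !(ignore.any (fun data => PySem.Str.isIn data path))
      if should_include then result ++ [path] else result) []

-- ===== PORT B =====
-- Port of B: progressive sieve — fold over the ignore list, filtering survivors each step.
def remove_ignored_files_alt (files_paths : List String) (ignore : List String) : List String :=
  ignore.foldl (fun remaining data =>
    remaining.filter (fun path => !PySem.Str.isIn data path)) files_paths

-- ===== PRECONDITION & SPEC =====
def Spec_remove_ignored_files (files_paths : List String) (ignore : List String) (out : List String) : Prop := out = remove_ignored_files_alt files_paths ignore
instance (files_paths : List String) (ignore : List String) (out : List String) : Decidable (Spec_remove_ignored_files files_paths ignore out) := by unfold Spec_remove_ignored_files; infer_instance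

-- ===== CLAIM (what is proved, stated in full; the proofs are below) =====
def Claim_equal_remove_ignored_files : Prop := ∀ (files_paths : List String) (ignore : List String), Dom_remove_ignored_files files_paths ignore → Spec_remove_ignored_files files_paths ignore (remove_ignored_files files_paths ignore)

-- ===== LEMMAS AND PROOFS =====

-- B's sieve equals one filter by "no ignore substring occurs".
theorem alt_eq_filter (ignore files_paths : List String) :
    remove_ignored_files_alt files_paths ignore
      = files_paths.filter (fun path => !(ignore.any (fun data => PySem.Str.isIn data path))) := by
  induction ignore generalizing files_paths with
  | nil => simp [remove_ignored_files_alt]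
  | cons d rest ih =>
    simp only [remove_ignored_files_alt, List.foldl_cons] at *
    rw [ih, List.filter_filter]
    congr 1
    funext p
    simp [Bool.and_comm]

-- ===== VERDICT (by name: the statement is the Claim_ definition above) =====
theorem remove_ignored_files_spec : Claim_equal_remove_ignored_files := by
  intro files_paths ignore _
  unfold Spec_remove_ignored_files remove_ignored_files
  rw [alt_eq_filter]
  by_cases h : ignore = []
  · simp [h]
  · simp only [if_neg h]
    rw [PySem.List.foldl_append_if_eq_filter]
    simp
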